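-- pv_equiv track=rewrite | github.com/seef07/MinProg-AH | A_new_datastru/D3_MonteCarlo.py | rotate_segment_3d
-- ===== SOURCE A (Python) =====
-- def is_valid_configuration(positions):
--     """
--     Check if a configuration of positions represents a valid, non-overlapping state.
--
--     Parameters:
--     - positions (list of tuples): Coordinates of amino acids in the protein.
--
--     Returns:
--     - bool: True if the configuration is valid, False otherwise.
--     """
--     return len(positions) == len(set(positions))
--
-- def rotate_segment_3d(positions, index, direction, axis):
--     """
--     Rotate a segment of the protein around a specified axis and direction.
--
--     Parameters:
--     - positions (list of tuples): Coordinates of amino acids in the protein.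
--     - index (int): Index of the pivot point for rotation.
--     - direction (str): 'clockwise' or 'counterclockwise' rotation.
--     - axis (str): Axis of rotation ('x', 'y', or 'z').
--
--     Returns:
--     - list of tuples: New coordinates after rotation.
--     """
--     new_positions = positions.copy()
--     pivot = positions[index]
--
--     # Rotation logic depending on the axis and direction
--     for i in range(index + 1, len(positions)):
--         x, y, z = positions[i]
--         dx, dy, dz = x - pivot[0], y - pivot[1], z - pivot[2]
--
--         # Apply rotation based on the axis and direction
--         if axis == 'x':
--             if direction == 'clockwise':
--                 new_positions[i] = (x, pivot[1] - dz, pivot[2] + dy)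
--             else:  # counterclockwise
--                 new_positions[i] = (x, pivot[1] + dz, pivot[2] - dy)
--         elif axis == 'y':
--             if direction == 'clockwise':
--                 new_positions[i] = (pivot[0] + dz, y, pivot[2] - dx)
--             else:  # counterclockwise
--                 new_positions[i] = (pivot[0] - dz, y, pivot[2] + dx)
--         elif axis == 'z':
--             if direction == 'clockwise':
--                 new_positions[i] = (pivot[0] - dy, pivot[1] + dx, z)
--             else:  # counterclockwise
--                 new_positions[i] = (pivot[0] + dy, pivot[1] - dx, z)
--
--     return new_positions if is_valid_configuration(new_positions) else positions
-- ===== SOURCE B (Python) =====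
-- def rotate_segment_3d(positions, index, direction, axis):
--     """Rotate the suffix after the pivot by iterating a single counterclockwise
--     quarter turn (once for counterclockwise, three times for clockwise), in
--     staged passes: translate to the pivot, turn, translate back; on overlap
--     return the original list."""
--     pivot = positions[index]
--     quarter = {
--         'x': lambda v: (v[0], v[2], -v[1]),
--         'y': lambda v: (-v[2], v[1], v[0]),
--         'z': lambda v: (v[1], -v[0], v[2]),
--     }.get(axis)
--     if quarter is None:
--         return positions
--     turns = 3 if direction == 'clockwise' else 1
--     start = max(index + 1, 0)
--     rel = [(x - pivot[0], y - pivot[1], z - pivot[2]) for x, y, z in positions[start:]]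
--     for _ in range(turns):
--         rel = [quarter(v) for v in rel]
--     rotated = positions[:start] + [(u + pivot[0], v + pivot[1], w + pivot[2]) for u, v, w in rel]
--     return rotated if len(rotated) == len(set(rotated)) else positions
-- ===== Notes on version B (the rewrite author's own statement) =====
-- stated objective: alternative
-- what changed: B has no per-direction rotation formulas at all: it keeps only one counterclockwise quarter-turn per axis and obtains clockwise as that turn iterated three times, in staged passes (translate the suffix to the pivot, apply the quarter turn 1 or 3 times over the whole relative list, translate back and concatenate), instead of A's single index loop with six branch-selected assignment formulas into a mutated copy.
import Mathlib
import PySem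

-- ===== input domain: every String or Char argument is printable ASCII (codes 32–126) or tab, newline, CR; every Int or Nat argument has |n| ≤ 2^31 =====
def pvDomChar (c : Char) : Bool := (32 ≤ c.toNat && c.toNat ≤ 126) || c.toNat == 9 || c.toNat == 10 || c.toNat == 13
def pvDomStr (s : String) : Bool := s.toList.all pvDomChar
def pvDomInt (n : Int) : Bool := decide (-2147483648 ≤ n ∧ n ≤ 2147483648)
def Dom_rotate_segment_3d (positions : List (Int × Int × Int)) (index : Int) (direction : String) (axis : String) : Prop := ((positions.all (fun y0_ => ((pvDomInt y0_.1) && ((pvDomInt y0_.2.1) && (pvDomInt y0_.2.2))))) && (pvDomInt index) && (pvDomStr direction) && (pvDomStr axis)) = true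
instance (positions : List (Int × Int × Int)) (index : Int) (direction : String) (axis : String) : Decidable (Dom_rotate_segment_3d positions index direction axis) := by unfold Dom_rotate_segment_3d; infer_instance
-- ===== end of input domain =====

-- B keeps only one counterclockwise quarter-turn per axis and obtains clockwise by iterating it three
-- times, in staged passes (translate suffix to the pivot, turn 1 or 3 times, translate back), instead
-- of A's index loop with six branch-selected formulas (objective: alternative).

-- ===== PORT A =====
def is_valid_configuration (positions : List (Int × Int × Int)) : Bool :=
  PySem.List.len positions == PySem.Set.len (PySem.Set.ofList positions)

-- the body of A's for-loop (one iteration: new_positions[i] = rotated positions[i])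
def rotateStep (pivot : Int × Int × Int) (direction axis : String)
    (positions : List (Int × Int × Int)) (np : List (Int × Int × Int)) (i : Int) :
    List (Int × Int × Int) :=
  let p := PySem.List.pyGetD positions i (0, 0, 0)
  let x := p.1; let y := p.2.1; let z := p.2.2
  let dx := x - pivot.1; let dy := y - pivot.2.1; let dz := z - pivot.2.2
  if axis = "x" then
    if direction = "clockwise" then PySem.List.pySetD np i (x, pivot.2.1 - dz, pivot.2.2 + dy)
    else PySem.List.pySetD np i (x, pivot.2.1 + dz, pivot.2.2 - dy)
  else if axis = "y" then
    if direction = "clockwise" then PySem.List.pySetD np i (pivot.1 + dz, y, pivot.2.2 - dx)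
    else PySem.List.pySetD np i (pivot.1 - dz, y, pivot.2.2 + dx)
  else if axis = "z" then
    if direction = "clockwise" then PySem.List.pySetD np i (pivot.1 - dy, pivot.2.1 + dx, z)
    else PySem.List.pySetD np i (pivot.1 + dy, pivot.2.1 - dx, z)
  else np

def rotate_segment_3d (positions : List (Int × Int × Int)) (index : Int) (direction : String) (axis : String) : List (Int × Int × Int) :=
  -- pivot = positions[index]; IndexError (pyGet? = none) is excluded by Pre_
  let pivot := (PySem.List.pyGet? positions index).getD (0, 0, 0)
  let new_positions :=
    (PySem.List.pyRange (index + 1) (PySem.List.len positions) 1).foldl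
      (rotateStep pivot direction axis positions) positions
  if is_valid_configuration new_positions then new_positions else positions

-- ===== PORT B =====
-- Source B's three counterclockwise quarter-turn lambdas
def quarterX (v : Int × Int × Int) : Int × Int × Int := (v.1, v.2.2, -v.2.1)
def quarterY (v : Int × Int × Int) : Int × Int × Int := (-v.2.2, v.2.1, v.1)
def quarterZ (v : Int × Int × Int) : Int × Int × Int := (v.2.1, -v.1, v.2.2)

def rotate_segment_3d_alt (positions : List (Int × Int × Int)) (index : Int) (direction : String) (axis : String) : List (Int × Int × Int) :=
  let pivot := (PySem.List.pyGet? positions index).getD (0, 0, 0)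
  match PySem.Dict.get?
      (PySem.Dict.ofList [("x", quarterX), ("y", quarterY), ("z", quarterZ)]) axis with
  | none => positions
  | some quarter =>
    let turns : Nat := if direction = "clockwise" then 3 else 1
    let start := max (index + 1) 0
    let rel := (PySem.List.slice positions (some start) none).map
        (fun p => (p.1 - pivot.1, p.2.1 - pivot.2.1, p.2.2 - pivot.2.2))
    -- 'for _ in range(turns): rel = [quarter(v) for v in rel]'
    let rel := (List.range turns).foldl (fun r _ => r.map quarter) rel
    let rotated := PySem.List.slice positions none (some start) ++
        rel.map (fun v => (v.1 + pivot.1, v.2.1 + pivot.2.1, v.2.2 + pivot.2.2))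
    if PySem.List.len rotated == PySem.Set.len (PySem.Set.ofList rotated) then rotated else positions

-- ===== PRECONDITION & SPEC =====
-- Pre_ excludes exactly the inputs where A raises IndexError at 'pivot = positions[index]'
def Pre_rotate_segment_3d (positions : List (Int × Int × Int)) (index : Int) (direction : String) (axis : String) : Prop :=
  PySem.Raise.InRange positions.length index
instance (positions : List (Int × Int × Int)) (index : Int) (direction : String) (axis : String) : Decidable (Pre_rotate_segment_3d positions index direction axis) := by unfold Pre_rotate_segment_3d; infer_instance

def pvWitness_rotate_segment_3d : (List (Int × Int × Int)) × Int × String × String :=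
  ([(0, 0, 0), (1, 0, 0), (1, 1, 0)], 0, "clockwise", "x")

def Spec_rotate_segment_3d (positions : List (Int × Int × Int)) (index : Int) (direction : String) (axis : String) (out : List (Int × Int × Int)) : Prop := out = rotate_segment_3d_alt positions index direction axis
instance (positions : List (Int × Int × Int)) (index : Int) (direction : String) (axis : String) (out : List (Int × Int × Int)) : Decidable (Spec_rotate_segment_3d positions index direction axis out) := by unfold Spec_rotate_segment_3d; infer_instance

-- ===== CLAIM (what is proved, stated in full; the proofs are below) =====
def Claim_equal_rotate_segment_3d : Prop := ∀ (positions : List (Int × Int × Int)) (index : Int) (direction : String) (axis : String), Dom_rotate_segment_3d positions index direction axis → Pre_rotate_segment_3d positions index direction axis → Spec_rotate_segment_3d positions index direction axis (rotate_segment_3d positions index direction axis)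

-- ===== LEMMAS AND PROOFS =====

-- setting indices never changes the length of the accumulator
theorem length_foldl_pySetD {α : Type} (l : List Int) (f : Int → α) (np : List α) :
    (l.foldl (fun np i => PySem.List.pySetD np i (f i)) np).length = np.length := by
  induction l generalizing np with
  | nil => rfl
  | cons a l ih => simp [List.foldl_cons, ih, PySem.List.length_pySetD]

theorem take_set_succ {α : Type} (np : List α) (a : Nat) (v : α) (h : a < np.length) :
    (np.set a v).take (a + 1) = np.take a ++ [v] := by
  rw [List.set_eq_take_append_cons_drop, if_pos h]
  have hl : (np.take a).length = a := by simp [h.le]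
  have : a + 1 = (np.take a).length + 1 := by omega
  rw [this, List.take_append]
  simp

-- the core loop shape: writing g(positions[i]) at index i, for i in range(a, len), turns the tail into a map
theorem foldl_set_from {α : Type} (g : α → α) (d : α) (positions : List α) (a : Nat)
    (np : List α) (hlen : np.length = positions.length) :
    (PySem.List.pyRange (a : Int) (positions.length : Int) 1).foldl
      (fun np i => PySem.List.pySetD np i (g (PySem.List.pyGetD positions i d))) np
    = np.take a ++ (positions.drop a).map g := by
  obtain ⟨m, hm⟩ : ∃ m, positions.length - a = m := ⟨_, rfl⟩
  induction m generalizing a np with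
  | zero =>
    rw [PySem.List.pyRange_one_eq_nil (by exact_mod_cast (by omega : (positions.length:Int) ≤ a))]
    simp [List.take_of_length_le (by omega : np.length ≤ a),
          List.drop_of_length_le (by omega : positions.length ≤ a)]
  | succ m ih =>
    have hlt : a < positions.length := by omega
    rw [PySem.List.pyRange_one_cons (by exact_mod_cast hlt)]
    simp only [List.foldl_cons, PySem.List.pySetD_natCast, PySem.List.pyGetD_natCast]
    have hcast : ((a : Int) + 1) = (((a + 1 : Nat)) : Int) := by push_cast; ring
    rw [hcast, ih (a + 1) _ (by simp [hlen]) (by omega)]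
    rw [List.drop_eq_getElem_cons hlt, List.map_cons]
    rw [take_set_succ _ _ _ (by omega), List.getD_eq_getElem _ _ hlt]
    simp

-- A's whole loop (range(index+1, len) with writes reading the original list) computes
-- prefix ++ map g suffix, cut at max(index+1, 0): for a negative index the nonnegative
-- half of the range overwrites every entry
theorem foldl_set_range {α : Type} (g : α → α) (d : α) (positions : List α) (index : Int) :
    (PySem.List.pyRange (index + 1) (PySem.List.len positions) 1).foldl
      (fun np i => PySem.List.pySetD np i (g (PySem.List.pyGetD positions i d))) positions
    = positions.take (max (index + 1) 0).toNat ++ ((positions.drop (max (index + 1) 0).toNat).map g) := by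
  by_cases h : 0 ≤ index + 1
  · have hmax : max (index + 1) 0 = index + 1 := by omega
    have hcast : index + 1 = ((index + 1).toNat : Int) := by omega
    rw [hmax, PySem.List.len_eq, hcast,
      foldl_set_from g d positions (index + 1).toNat positions rfl]
    simp only [Int.toNat_natCast]
  · have hmax : max (index + 1) 0 = 0 := by omega
    rw [PySem.List.len_eq,
      PySem.List.pyRange_one_append (index + 1) 0 positions.length (by omega) (by omega),
      List.foldl_append]
    have h0 : ((0 : Nat) : Int) = (0 : Int) := rfl
    rw [← h0, foldl_set_from g d positions 0 _
      (length_foldl_pySetD _ (fun i => g (PySem.List.pyGetD positions i d)) positions)]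
    simp [hmax]

-- B's turns loop: repeatedly mapping a function over the list is mapping its iterate
theorem foldl_range_map {α : Type} (q : α → α) (n : Nat) (rel : List α) :
    (List.range n).foldl (fun r _ => r.map q) rel = rel.map (q^[n]) := by
  induction n generalizing rel with
  | zero => simp
  | succ n ih =>
    rw [List.range_succ, List.foldl_append, ih]
    simp only [List.foldl_cons, List.foldl_nil, List.map_map]
    refine List.map_congr_left (fun a _ => ?_)
    exact (Function.iterate_succ_apply' q n a).symm

-- the per-point function of Source B's staged passes: translate, quarter-turn 'turns' times, translate back
def stageF (q : (Int × Int × Int) → (Int × Int × Int)) (turns : Nat)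
    (pivot p : Int × Int × Int) : Int × Int × Int :=
  let v := q^[turns] (p.1 - pivot.1, p.2.1 - pivot.2.1, p.2.2 - pivot.2.2)
  (v.1 + pivot.1, v.2.1 + pivot.2.1, v.2.2 + pivot.2.2)

-- both ports agree once A's step is 'write stageF(positions[i])' and B's dict lookup yields
-- the quarter turn of those staged passes
theorem eq_of_step (positions : List (Int × Int × Int)) (index : Int) (direction axis : String)
    (q : (Int × Int × Int) → (Int × Int × Int)) (turns : Nat)
    (hget : PySem.Dict.get?
      (PySem.Dict.ofList [("x", quarterX), ("y", quarterY), ("z", quarterZ)]) axis = some q)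
    (hturns : (if direction = "clockwise" then (3 : Nat) else 1) = turns)
    (hstep : ∀ pivot np i, rotateStep pivot direction axis positions np i
       = PySem.List.pySetD np i
           (stageF q turns pivot (PySem.List.pyGetD positions i ((0:Int), (0:Int), (0:Int))))) :
    rotate_segment_3d positions index direction axis
      = rotate_segment_3d_alt positions index direction axis := by
  simp only [rotate_segment_3d, rotate_segment_3d_alt, is_valid_configuration]
  have hbody : rotateStep ((PySem.List.pyGet? positions index).getD (0, 0, 0)) direction axis positions
      = fun np i => PySem.List.pySetD np i
          (stageF q turns ((PySem.List.pyGet? positions index).getD (0, 0, 0))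
            (PySem.List.pyGetD positions i (0, 0, 0))) := by
    funext np i; exact hstep _ np i
  simp only [hget, hbody, hturns, foldl_range_map, List.map_map]
  rw [foldl_set_range (stageF q turns ((PySem.List.pyGet? positions index).getD (0, 0, 0)))
        ((0:Int), (0:Int), (0:Int)) positions index,
    PySem.List.slice_to positions (show (0:Int) ≤ max (index + 1) 0 by omega),
    PySem.List.slice_from positions (show (0:Int) ≤ max (index + 1) 0 by omega)]
  rfl

-- unknown axis: A's loop writes nothing, B's dict lookup misses; both return positions
theorem eq_of_no_axis (positions : List (Int × Int × Int)) (index : Int) (direction axis : String)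
    (hx : axis ≠ "x") (hy : axis ≠ "y") (hz : axis ≠ "z") :
    rotate_segment_3d positions index direction axis
      = rotate_segment_3d_alt positions index direction axis := by
  simp only [rotate_segment_3d, rotate_segment_3d_alt, is_valid_configuration]
  have hget : PySem.Dict.get?
      (PySem.Dict.ofList [("x", quarterX), ("y", quarterY), ("z", quarterZ)]) axis
      = (none : Option ((Int × Int × Int) → (Int × Int × Int))) := by
    have e1 : ("x" == axis) = false := beq_eq_false_iff_ne.mpr (Ne.symm hx)
    have e2 : ("y" == axis) = false := beq_eq_false_iff_ne.mpr (Ne.symm hy)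
    have e3 : ("z" == axis) = false := beq_eq_false_iff_ne.mpr (Ne.symm hz)
    rw [show (PySem.Dict.ofList [("x", quarterX), ("y", quarterY), ("z", quarterZ)]
        : PySem.Dict String ((Int × Int × Int) → (Int × Int × Int)))
      = PySem.Dict.mk [("x", quarterX), ("y", quarterY), ("z", quarterZ)] from rfl]
    simp [e1, e2, e3, PySem.Dict.get?]
  have hbody : rotateStep ((PySem.List.pyGet? positions index).getD (0, 0, 0)) direction axis positions
      = fun np _ => np := by
    funext np i; simp [rotateStep, hx, hy, hz]
  simp only [hget, hbody, List.foldl_fixed, ite_self]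

-- ===== VERDICT (by name: the statement is the Claim_ definition above) =====
theorem rotate_segment_3d_spec : Claim_equal_rotate_segment_3d := by
  intro positions index direction axis _ _
  unfold Spec_rotate_segment_3d
  by_cases hx : axis = "x"
  · subst hx
    by_cases hd : direction = "clockwise"
    · subst hd
      exact eq_of_step positions index "clockwise" "x" quarterX 3 rfl rfl
        (fun pivot np i => by
          simp [rotateStep, stageF, quarterX, Function.iterate_succ]
          congr 1
          refine Prod.ext (by ring) (Prod.ext (by ring) (by ring)))
    · exact eq_of_step positions index direction "x" quarterX 1 rfl (by simp [hd])
        (fun pivot np i => by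
          simp [rotateStep, stageF, quarterX, hd]
          congr 1
          refine Prod.ext (by ring) (Prod.ext (by ring) (by ring)))
  · by_cases hy : axis = "y"
    · subst hy
      by_cases hd : direction = "clockwise"
      · subst hd
        exact eq_of_step positions index "clockwise" "y" quarterY 3 rfl rfl
          (fun pivot np i => by
            simp [rotateStep, stageF, quarterY, Function.iterate_succ]
            congr 1
            refine Prod.ext (by ring) (Prod.ext (by ring) (by ring)))
      · exact eq_of_step positions index direction "y" quarterY 1 rfl (by simp [hd])
          (fun pivot np i => by
            simp [rotateStep, stageF, quarterY, hd]
            congr 1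
            refine Prod.ext (by ring) (Prod.ext (by ring) (by ring)))
    · by_cases hz : axis = "z"
      · subst hz
        by_cases hd : direction = "clockwise"
        · subst hd
          exact eq_of_step positions index "clockwise" "z" quarterZ 3 rfl rfl
            (fun pivot np i => by
              simp [rotateStep, stageF, quarterZ, Function.iterate_succ]
              congr 1
              refine Prod.ext (by ring) (Prod.ext (by ring) (by ring)))
        · exact eq_of_step positions index direction "z" quarterZ 1 rfl (by simp [hd])
            (fun pivot np i => by
              simp [rotateStep, stageF, quarterZ, hd]
              congr 1
              refine Prod.ext (by ring) (Prod.ext (by ring) (by ring)))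
      · exact eq_of_no_axis positions index direction axis hx hy hz
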